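-- pv_equiv track=rewrite | github.com/Mayank-Agrawal9/Real-Estate-CNP | p2pmb/calculation.py | get_level_by_direct_user_required_counts
-- ===== SOURCE A (Python) =====
-- def get_level_by_direct_user_required_counts(level):
--     """
--     Given a level, return the key whose value range includes that level,
--     picking the smallest key that still qualifies.
--     """
--     level_map = {
--         1: 2,
--         2: 5,
--         3: 10,
--         4: 15,
--         5: 20,
--     }
--
--     for key, max_level in sorted(level_map.items()):
--         if level <= max_level:
--             return key
--     return None
-- ===== SOURCE B (Python) =====
-- _THRESHOLDS = (2, 5, 10, 15, 20)
--
-- def get_level_by_direct_user_required_counts(level):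
--     """Binary search for the first bracket threshold >= level; brackets are 1-based."""
--     lo, hi = 0, len(_THRESHOLDS)
--     while lo < hi:
--         mid = (lo + hi) // 2
--         if _THRESHOLDS[mid] < level:
--             lo = mid + 1
--         else:
--             hi = mid
--     return lo + 1 if lo < len(_THRESHOLDS) else None
-- ===== Notes on version B (the rewrite author's own statement) =====
-- stated objective: alternative
-- what changed: Replaced A's linear scan over the sorted dict items with a hand-written bisect_left-style binary search over a precomputed threshold tuple.
import Mathlib
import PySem

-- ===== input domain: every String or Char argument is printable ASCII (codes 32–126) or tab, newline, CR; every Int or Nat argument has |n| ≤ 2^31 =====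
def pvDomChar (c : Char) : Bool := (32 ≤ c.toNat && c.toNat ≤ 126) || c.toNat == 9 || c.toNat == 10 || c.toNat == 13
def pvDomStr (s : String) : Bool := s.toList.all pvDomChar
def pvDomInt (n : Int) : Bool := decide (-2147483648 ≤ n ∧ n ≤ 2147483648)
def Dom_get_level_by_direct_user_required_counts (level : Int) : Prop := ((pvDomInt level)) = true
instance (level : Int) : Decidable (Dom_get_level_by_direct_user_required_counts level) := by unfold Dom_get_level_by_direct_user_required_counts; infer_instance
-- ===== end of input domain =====

-- B replaces A's linear scan of the sorted dict items with a binary search (bisect_left) over the threshold list (alternative decomposition, same result).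


-- ===== PORT A =====
-- A: build the dict, sort its items, scan for the first pair with level ≤ max_level.
def pvScanA (level : Int) : List (Int × Int) → Option Int
  | [] => none
  | (key, max_level) :: rest => if level ≤ max_level then some key else pvScanA level rest

def get_level_by_direct_user_required_counts (level : Int) : Option Int :=
  let level_map : PySem.Dict Int Int :=
    ((((PySem.Dict.empty.insert 1 2).insert 2 5).insert 3 10).insert 4 15).insert 5 20
  pvScanA level (PySem.List.sorted level_map.items (fun x => x.1) false)

-- ===== PORT B =====
-- B: binary search (bisect_left) over the fixed threshold list.
def pvThresholds : List Int := [2, 5, 10, 15, 20]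

def pvBisect (level : Int) (lo hi : Nat) : Nat :=
  if _h : lo < hi then
    let mid := (lo + hi) / 2
    if pvThresholds.getD mid 0 < level then pvBisect level (mid + 1) hi
    else pvBisect level lo mid
  else lo
termination_by hi - lo

def get_level_by_direct_user_required_counts_alt (level : Int) : Option Int :=
  let lo := pvBisect level 0 pvThresholds.length
  if lo < pvThresholds.length then some ((lo : Int) + 1) else none

-- ===== PRECONDITION & SPEC =====
def Spec_get_level_by_direct_user_required_counts (level : Int) (out : Option Int) : Prop := out = get_level_by_direct_user_required_counts_alt level
instance (level : Int) (out : Option Int) : Decidable (Spec_get_level_by_direct_user_required_counts level out) := by unfold Spec_get_level_by_direct_user_required_counts; infer_instance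

-- ===== CLAIM (what is proved, stated in full; the proofs are below) =====
def Claim_equal_get_level_by_direct_user_required_counts : Prop := ∀ (level : Int), Dom_get_level_by_direct_user_required_counts level → Spec_get_level_by_direct_user_required_counts level (get_level_by_direct_user_required_counts level)

-- ===== LEMMAS AND PROOFS =====

-- ===== VERDICT (by name: the statement is the Claim_ definition above) =====
theorem get_level_by_direct_user_required_counts_spec : Claim_equal_get_level_by_direct_user_required_counts := by
  intro level _
  unfold Spec_get_level_by_direct_user_required_counts
  show get_level_by_direct_user_required_counts level = _
  unfold get_level_by_direct_user_required_counts get_level_by_direct_user_required_counts_alt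
  have hsort : PySem.List.sorted (((((PySem.Dict.empty.insert (1:Int) (2:Int)).insert 2 5).insert 3 10).insert 4 15).insert 5 20).items (fun x => x.1) false = [(1,2),(2,5),(3,10),(4,15),(5,20)] := by decide
  simp only [hsort]
  have b00 : pvBisect level 0 0 = 0 := by unfold pvBisect; norm_num
  have b11 : pvBisect level 1 1 = 1 := by unfold pvBisect; norm_num
  have b22 : pvBisect level 2 2 = 2 := by unfold pvBisect; norm_num
  have b33 : pvBisect level 3 3 = 3 := by unfold pvBisect; norm_num
  have b44 : pvBisect level 4 4 = 4 := by unfold pvBisect; norm_num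
  have b55 : pvBisect level 5 5 = 5 := by unfold pvBisect; norm_num
  have b01 : pvBisect level 0 1 = if (2:Int) < level then 1 else 0 := by
    unfold pvBisect; simp only [b11, b00]; norm_num [pvThresholds]
  have b34 : pvBisect level 3 4 = if (15:Int) < level then 4 else 3 := by
    unfold pvBisect; simp only [b44, b33]; norm_num [pvThresholds]
  have b02 : pvBisect level 0 2 = if (5:Int) < level then 2 else if (2:Int) < level then 1 else 0 := by
    unfold pvBisect; simp only [b22, b01]; norm_num [pvThresholds]
  have b35 : pvBisect level 3 5 = if (20:Int) < level then 5 else if (15:Int) < level then 4 else 3 := by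
    unfold pvBisect; simp only [b55, b34]; norm_num [pvThresholds]
  have hbis : pvBisect level 0 pvThresholds.length =
      (if level ≤ 2 then 0 else if level ≤ 5 then 1 else if level ≤ 10 then 2
       else if level ≤ 15 then 3 else if level ≤ 20 then 4 else 5) := by
    have h5 : pvThresholds.length = 5 := by norm_num [pvThresholds]
    rw [h5]; unfold pvBisect; simp only [b35, b02]; norm_num [pvThresholds]
    split_ifs <;> omega
  simp only [hbis]
  simp only [pvScanA, pvThresholds, List.length]
  split_ifs <;> simp_all
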